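-- pv_equiv track=rewrite | github.com/devmaster518/gen-crypto-token-names | gen_token_names.py | gen_names
-- ===== SOURCE A (Python) =====
-- from typing import Iterator
-- from string import ascii_uppercase
--
-- def concat(head: str, tail: Iterator[str]) -> Iterator[str]:
--     if tail:
--         yield from [head + e for e in tail]
--     else:
--         yield head
--
-- def gen_names(pattern: str) -> Iterator[str]:
--     if not pattern:
--         return []
--     for c in pattern:
--         if c == '*':
--             ret = list()
--             for letter in ascii_uppercase:
--                 for item in concat(letter, gen_names(pattern[1:])):
--                     ret.append(item)
--             return ret
--         else:
--             return concat(c, gen_names(pattern[1:]))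
-- ===== SOURCE B (Python) =====
-- from string import ascii_uppercase
--
-- def gen_names(pattern):
--     if not pattern:
--         return []
--     out = ['']
--     for c in reversed(pattern):
--         chars = ascii_uppercase if c == '*' else c
--         out = [ch + s for ch in chars for s in out]
--     return out
-- ===== Notes on version B (the rewrite author's own statement) =====
-- stated objective: faster
-- what changed: Replaces A's recursion that re-computes the suffix expansion 26 times per '*' (once per letter) with a single right-to-left pass that expands the suffix once and prefixes each candidate character onto it.
import Mathlib
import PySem

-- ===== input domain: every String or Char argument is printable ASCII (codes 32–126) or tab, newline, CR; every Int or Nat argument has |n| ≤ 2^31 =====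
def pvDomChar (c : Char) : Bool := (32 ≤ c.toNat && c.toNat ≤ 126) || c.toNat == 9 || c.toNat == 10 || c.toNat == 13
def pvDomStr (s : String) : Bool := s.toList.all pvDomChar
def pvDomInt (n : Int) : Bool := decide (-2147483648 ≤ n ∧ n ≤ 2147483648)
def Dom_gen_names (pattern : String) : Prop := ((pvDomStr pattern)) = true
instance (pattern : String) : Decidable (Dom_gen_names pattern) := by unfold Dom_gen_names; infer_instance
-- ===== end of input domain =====

-- B replaces A's recursion (which re-expands the suffix once per letter of a '*')
-- with one right-to-left pass expanding the suffix a single time: faster for patterns with stars.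


-- ===== PORT A =====
-- strings are manipulated as List Char; the wrapper applies String.mk at the end (both ports do).
def pvUppercase : List Char := "ABCDEFGHIJKLMNOPQRSTUVWXYZ".toList

-- concat(head, tail): 'if tail:' — in A the tail is either a list or a generator; a generator is
-- always truthy but (in A's recursion) also always non-empty, so the truthiness test coincides
-- with the emptiness test on the yielded values; ported as the emptiness test.
def pvConcatA (head : Char) (tail : List (List Char)) : List (List Char) :=
  if tail ≠ [] then tail.map (fun e => head :: e) else [[head]]

-- for c in pattern: both branches return on the first iteration, so only the head is inspected.
def pvGenA : List Char → List (List Char)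
  | [] => []
  | c :: rest =>
      if c = '*' then
        pvUppercase.foldl (fun ret letter => ret ++ pvConcatA letter (pvGenA rest)) []
      else
        pvConcatA c (pvGenA rest)

def gen_names (pattern : String) : List String :=
  (pvGenA pattern.toList).map String.mk

-- ===== PORT B =====
def pvCharsB (c : Char) : List Char := if c = '*' then pvUppercase else [c]

def pvGenB (l : List Char) : List (List Char) :=
  l.reverse.foldl (fun out c => (pvCharsB c).flatMap (fun ch => out.map (fun s => ch :: s))) [[]]

def gen_names_alt (pattern : String) : List String :=
  if pattern.toList = [] then [] else (pvGenB pattern.toList).map String.mk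

-- ===== PRECONDITION & SPEC =====
def Spec_gen_names (pattern : String) (out : List String) : Prop := out = gen_names_alt pattern
instance (pattern : String) (out : List String) : Decidable (Spec_gen_names pattern out) := by unfold Spec_gen_names; infer_instance

-- ===== CLAIM (what is proved, stated in full; the proofs are below) =====
def Claim_equal_gen_names : Prop := ∀ (pattern : String), Dom_gen_names pattern → Spec_gen_names pattern (gen_names pattern)

-- ===== LEMMAS AND PROOFS =====

theorem pvGenB_cons (c : Char) (rest : List Char) :
    pvGenB (c :: rest) = (pvCharsB c).flatMap (fun ch => (pvGenB rest).map (fun s => ch :: s)) := by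
  unfold pvGenB
  rw [List.reverse_cons, List.foldl_append]
  rfl

theorem pvGenB_ne_nil (l : List Char) : pvGenB l ≠ [] := by
  induction l with
  | nil => simp [pvGenB]
  | cons c rest ih =>
      rw [pvGenB_cons]
      simp only [ne_eq, List.flatMap_eq_nil_iff, not_forall]
      refine ⟨(pvCharsB c).headI, ?_, ?_⟩
      · unfold pvCharsB; split <;> simp [pvUppercase]
      · simp [ih]

theorem pvGenA_eq_pvGenB (l : List Char) (h : l ≠ []) : pvGenA l = pvGenB l := by
  induction l with
  | nil => exact absurd rfl h
  | cons c rest ih =>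
      rw [pvGenB_cons]
      have hconcat : ∀ ch : Char, pvConcatA ch (pvGenA rest) = (pvGenB rest).map (fun s => ch :: s) := by
        intro ch
        cases hr : rest with
        | nil => simp [pvConcatA, pvGenA, pvGenB]
        | cons x xs =>
            have hne : rest ≠ [] := by simp [hr]
            rw [← hr, pvConcatA, ih hne, if_pos (pvGenB_ne_nil rest)]
      unfold pvGenA
      split
      · rw [PySem.List.foldl_append_eq_flatMap]
        simp only [List.nil_append]
        rename_i hc
        rw [hc]
        exact List.flatMap_congr (fun letter _ => hconcat letter) ▸ rfl
      · rename_i hc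
        simp [pvCharsB, hc, hconcat c]

-- ===== VERDICT (by name: the statement is the Claim_ definition above) =====
theorem gen_names_spec : Claim_equal_gen_names := by
  intro pattern _
  unfold Spec_gen_names gen_names gen_names_alt
  by_cases h : pattern.toList = []
  · simp [h, pvGenA]
  · rw [if_neg h, pvGenA_eq_pvGenB _ h]
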